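-- pv_equiv track=rewrite | github.com/piri-nyan/gb.pybase | lesson4/tasks/task6.py | roundabout
-- ===== SOURCE A (Python) =====
-- from itertools import count, cycle
--
-- def roundabout(lst, fin):
--     i = 0
--     for el in cycle(lst):
--         if i <= fin*len(lst):
--             yield el
--             i+=1
--         else:
--             break
-- ===== SOURCE B (Python) =====
-- def roundabout(lst, fin):
--     # B: nested outer-repetition/inner-traversal instead of a cyclic stream with a counter.
--     if not lst or fin < 0:
--         return
--     for _ in range(fin):
--         yield from lst
--     yield lst[0]
-- ===== Notes on version B (the rewrite author's own statement) =====
-- stated objective: simpler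
-- what changed: Replaces the itertools.cycle stream with an element counter by an explicit guard, fin whole passes over the list via nested yields, and one trailing first element.
import Mathlib
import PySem

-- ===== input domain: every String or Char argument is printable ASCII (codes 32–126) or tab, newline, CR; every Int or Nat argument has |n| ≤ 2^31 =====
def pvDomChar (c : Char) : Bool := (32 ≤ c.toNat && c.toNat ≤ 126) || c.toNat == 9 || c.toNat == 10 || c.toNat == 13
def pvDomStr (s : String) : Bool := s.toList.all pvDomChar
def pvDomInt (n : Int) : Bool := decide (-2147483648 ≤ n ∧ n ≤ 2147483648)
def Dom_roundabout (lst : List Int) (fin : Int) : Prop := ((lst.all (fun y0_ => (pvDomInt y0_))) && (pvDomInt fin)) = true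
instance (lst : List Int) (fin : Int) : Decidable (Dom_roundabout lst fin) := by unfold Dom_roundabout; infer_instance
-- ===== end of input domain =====

-- B rewrites A's cycle-with-counter as a guard, fin whole passes over the list, then one trailing first element (objective: simpler).
-- Both Pythons are generators; equivalence is about the list of yielded elements.

-- ===== PORT A =====
-- the loop 'for el in cycle(lst): if i <= fin*len(lst): yield el; i+=1 else break';
-- cyc is the remaining part of the current pass of cycle(lst), refilled from lst when exhausted
def roundaboutGo (lst : List Int) (bound : Int) (i : Int) (cyc : List Int) (acc : List Int) : List Int :=
  match (if cyc.isEmpty then lst else cyc) with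
  | [] => acc.reverse                       -- lst = []: cycle(lst) yields nothing
  | h :: t =>
    if _hle : i ≤ bound then roundaboutGo lst bound (i + 1) t (h :: acc)
    else acc.reverse
termination_by (bound + 1 - i).toNat
decreasing_by omega

def roundabout (lst : List Int) (fin : Int) : List Int :=
  roundaboutGo lst (fin * lst.length) 0 lst []

-- ===== PORT B =====
def roundabout_alt (lst : List Int) (fin : Int) : List Int :=
  match lst with
  | [] => []                                -- 'if not lst or fin < 0: return'
  | h :: _ =>
    if fin < 0 then []
    else ((PySem.List.pyRange 0 fin 1).foldl (fun acc _ => acc ++ lst) []) ++ [h]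

-- ===== PRECONDITION & SPEC =====
def Spec_roundabout (lst : List Int) (fin : Int) (out : List Int) : Prop := out = roundabout_alt lst fin
instance (lst : List Int) (fin : Int) (out : List Int) : Decidable (Spec_roundabout lst fin out) := by unfold Spec_roundabout; infer_instance

-- ===== CLAIM (what is proved, stated in full; the proofs are below) =====
def Claim_equal_roundabout : Prop := ∀ (lst : List Int) (fin : Int), Dom_roundabout lst fin → Spec_roundabout lst fin (roundabout lst fin)

-- ===== LEMMAS AND PROOFS =====

-- the first n elements of the cyclic stream: current remainder cyc, refilled from lst
def cycTake (lst : List Int) : Nat → List Int → List Int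
  | 0, _ => []
  | n + 1, cyc =>
    match (if cyc.isEmpty then lst else cyc) with
    | [] => []
    | h :: t => h :: cycTake lst n t

theorem roundaboutGo_eq_cycTake (lst : List Int) (bound i : Int) (cyc acc : List Int) :
    roundaboutGo lst bound i cyc acc = acc.reverse ++ cycTake lst (bound + 1 - i).toNat cyc := by
  fun_induction roundaboutGo lst bound i cyc acc with
  | case1 i cyc acc hm =>
    cases hn : (bound + 1 - i).toNat with
    | zero => simp [cycTake]
    | succ n =>
      cases cyc with
      | nil => simp at hm; simp [cycTake, hm]
      | cons c cs => simp at hm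
  | case2 i cyc acc h t hm hle ih =>
    have hn : (bound + 1 - i).toNat = (bound + 1 - (i + 1)).toNat + 1 := by omega
    rw [hn]
    simp only [cycTake, ih]
    cases cyc with
    | nil => simp at hm; simp [hm]
    | cons c cs => simp at hm; simp [hm.1, hm.2]
  | case3 i cyc acc h t hm hle =>
    have hn : (bound + 1 - i).toNat = 0 := by
      omega
    rw [hn]
    simp [cycTake]

theorem cycTake_refill (lst : List Int) (h : lst ≠ []) (n : Nat) :
    cycTake lst n [] = cycTake lst n lst := by
  cases n with
  | zero => rfl
  | succ m =>
    cases lst with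
    | nil => exact absurd rfl h
    | cons a t => simp [cycTake]

theorem cycTake_pass (lst : List Int) (h : lst ≠ []) (cyc : List Int) (n : Nat) :
    cycTake lst (cyc.length + n) cyc = cyc ++ cycTake lst n lst := by
  induction cyc with
  | nil => simpa using cycTake_refill lst h n
  | cons a t ih =>
    simp only [List.length_cons]
    have : t.length + 1 + n = (t.length + n) + 1 := by omega
    rw [this]
    simp [cycTake, ih]

theorem cycTake_closed (lst : List Int) (h : lst ≠ []) (k : Nat) :
    cycTake lst (k * lst.length + 1) lst
      = (List.replicate k lst).flatten ++ [lst.headI] := by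
  induction k with
  | zero =>
    cases lst with
    | nil => exact absurd rfl h
    | cons a t => simp [cycTake]
  | succ k ih =>
    have : (k + 1) * lst.length + 1 = lst.length + (k * lst.length + 1) := by ring
    rw [this, cycTake_pass lst h lst _, ih]
    simp [List.replicate_succ]

theorem foldl_append_replicate (lst : List Int) (r : List Int) (acc : List Int) :
    r.foldl (fun acc _ => acc ++ lst) acc = acc ++ (List.replicate r.length lst).flatten := by
  induction r generalizing acc with
  | nil => simp
  | cons a t ih => simp [List.foldl_cons, ih, List.replicate_succ]

-- ===== VERDICT (by name: the statement is the Claim_ definition above) =====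
theorem roundabout_spec : Claim_equal_roundabout := by
  intro lst fin _
  unfold Spec_roundabout roundabout roundabout_alt
  rw [roundaboutGo_eq_cycTake]
  cases lst with
  | nil =>
    simp only [List.reverse_nil, List.nil_append, List.length_nil]
    cases hn : (fin * (0:Int) + 1 - 0).toNat with
    | zero => rfl
    | succ n => simp [cycTake]
  | cons a t =>
    by_cases hf : fin < 0
    · have hb : (fin * (((a :: t).length : Nat) : Int) + 1 - 0).toNat = 0 := by
        have hl : (1:Int) ≤ (((a :: t).length : Nat) : Int) := by
          simp [List.length_cons]
        have hmul : fin * (((a :: t).length : Nat) : Int) ≤ fin * 1 :=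
          mul_le_mul_of_nonpos_left hl (le_of_lt hf)
        rw [mul_one] at hmul
        omega
      rw [hb]
      simp [cycTake, hf]
    · rw [not_lt] at hf
      have h1 : ((fin.toNat : Nat) : Int) = fin := Int.toNat_of_nonneg hf
      have h2 : ((fin.toNat * (a :: t).length : Nat) : Int)
          = fin * (((a :: t).length : Nat) : Int) := by push_cast [h1]; ring
      have hb : (fin * (((a :: t).length : Nat) : Int) + 1 - 0).toNat
          = fin.toNat * (a :: t).length + 1 := by omega
      rw [hb, cycTake_closed (a :: t) (by simp)]
      have hr : (PySem.List.pyRange 0 fin 1).length = fin.toNat := by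
        rw [PySem.List.length_pyRange_one]; simp
      simp [not_lt.mpr hf, foldl_append_replicate (a :: t), hr, List.headI]
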